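-- pv_equiv track=rewrite | github.com/idansherman/final_project | utils/graph_utils.py | shortest_path_by_bfs
-- ===== SOURCE A (Python) =====
-- from collections import deque, defaultdict
--
-- def shortest_path_by_bfs(graph, start, end, max_distance):
--     """
--     Uses Breadth-First Search (BFS) to find the shortest path between two names.
--
--     :param graph: The adjacency list of name co-occurrences.
--     :param start: The starting person's name.
--     :param end: The target person's name.
--     :param max_distance: Maximum allowed distance for a valid connection.
--     :return: True if path length is <= max_distance, False otherwise.
--     """
--     if start == end:
--         return True  # Trivial case: same person
--
--     queue = deque([(start, 0)])  # (current_node, current_distance)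
--     visited = {start}
--
--     while queue:
--         node, distance = queue.popleft()
--
--         if distance > max_distance:
--             break  # Stop if exceeding max allowed jumps
--
--         for neighbor in graph.get(node, []):
--             if neighbor == end:
--                 return True  # Found a valid path
--             if neighbor not in visited:
--                 visited.add(neighbor)
--                 queue.append((neighbor, distance + 1))
--
--     return False  # No path within max_distance
-- ===== SOURCE B (Python) =====
-- def shortest_path_by_bfs(graph, start, end, max_distance):
--     """
--     Iterated relational image: repeatedly enlarge the set of nodes reachable
--     from start (adding all neighbors of the whole set each round, stopping at a
--     fixed point), then simply test whether `end` landed in the set.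
--     """
--     if start == end:
--         return True
--
--     reach = {start}
--     for _ in range(max_distance + 1):
--         expanded = reach | {nb for node in reach for nb in graph.get(node, [])}
--         if len(expanded) == len(reach):
--             break  # fixed point: nothing new is reachable
--         reach = expanded
--     return end in reach
-- ===== Notes on version B (the rewrite author's own statement) =====
-- stated objective: alternative
-- what changed: Replaces the (node,distance) queue BFS with an iterated relational image: repeatedly enlarge the set of reachable nodes by all neighbors of the whole set (stopping at a fixed point), with no queue, no visited bookkeeping and no early exit during traversal - membership of end is tested once at the end.
import Mathlib
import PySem

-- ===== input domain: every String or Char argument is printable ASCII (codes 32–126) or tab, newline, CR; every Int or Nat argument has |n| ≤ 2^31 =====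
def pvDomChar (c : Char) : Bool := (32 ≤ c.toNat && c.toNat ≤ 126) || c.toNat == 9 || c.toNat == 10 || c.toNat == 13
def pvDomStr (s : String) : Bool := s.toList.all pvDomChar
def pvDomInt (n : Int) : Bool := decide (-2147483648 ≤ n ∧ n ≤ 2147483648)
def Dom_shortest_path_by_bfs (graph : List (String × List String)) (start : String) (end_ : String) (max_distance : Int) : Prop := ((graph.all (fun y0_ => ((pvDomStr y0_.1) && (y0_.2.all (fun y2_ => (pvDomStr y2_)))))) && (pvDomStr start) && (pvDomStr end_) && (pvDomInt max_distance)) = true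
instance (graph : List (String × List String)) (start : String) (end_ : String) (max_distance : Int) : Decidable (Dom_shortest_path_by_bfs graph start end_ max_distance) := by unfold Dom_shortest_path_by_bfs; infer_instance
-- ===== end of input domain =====

-- B replaces A's (node,distance) queue BFS by an iterated relational image: it repeatedly
-- enlarges the reachable set by all its neighbors (stopping at a fixed point) and tests
-- membership of end at the very end (objective: alternative algorithm, same exact result).

-- ===== PORT A =====
-- inner 'for neighbor in graph.get(node, [])' loop of A; none = the 'return True' early exit
def pvScanA (end_ : String) (d : Int) : List String → List (String × Int) → PySem.Set String → Option (List (String × Int) × PySem.Set String)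
  | [], queue, visited => some (queue, visited)
  | n :: ns, queue, visited =>
    if n == end_ then none
    else if PySem.Set.contains visited n then pvScanA end_ d ns queue visited
    else pvScanA end_ d ns (queue ++ [(n, d + 1)]) (PySem.Set.add visited n)

-- termination helpers for A's while loop (used only by decreasing_by)
theorem pvGetD_subset (graph : List (String × List String)) (k : String) :
    ∀ n ∈ PySem.Dict.getD (PySem.Dict.mk graph) k [], n ∈ (graph.map Prod.snd).flatten := by
  induction graph with
  | nil =>
      intro n hn
      simp [PySem.Dict.getD_eq_get?_getD, PySem.Dict.get?] at hn
  | cons p rest ih =>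
      intro n hn
      rw [PySem.Dict.getD_eq_get?_getD] at hn
      obtain ⟨k1, v1⟩ := p
      rw [PySem.Dict.get?_mk_cons] at hn
      by_cases hk : (k1 == k) = true
      · simp only [hk, if_pos] at hn
        simp only [Option.getD_some] at hn
        simp [hn]
      · simp only [hk, if_neg, Bool.false_eq_true, not_false_iff] at hn
        have := ih n (by rw [PySem.Dict.getD_eq_get?_getD]; exact hn)
        simp [this]

theorem pvScanA_measure (P : List String) (end_ : String) (d : Int) :
    ∀ (ns : List String) (q : List (String × Int)) (vis : PySem.Set String)
      (q' : List (String × Int)) (vis' : PySem.Set String),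
      (∀ n ∈ ns, n ∈ P) → pvScanA end_ d ns q vis = some (q', vis') →
      q'.length + (P.toFinset \ vis'.toFinset).card ≤ q.length + (P.toFinset \ vis.toFinset).card := by
  intro ns
  induction ns with
  | nil =>
      intro q vis q' vis' _ h
      simp only [pvScanA, Option.some.injEq, Prod.mk.injEq] at h
      obtain ⟨rfl, rfl⟩ := h
      exact le_refl _
  | cons n ns ih =>
      intro q vis q' vis' hP h
      simp only [pvScanA] at h
      by_cases h1 : (n == end_) = true
      · simp [h1] at h
      · simp only [h1, Bool.false_eq_true, if_false] at h
        by_cases h2 : PySem.Set.contains vis n = true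
        · simp only [h2, if_pos] at h
          exact ih q vis q' vis' (fun m hm => hP m (List.mem_cons_of_mem _ hm)) h
        · simp only [h2, Bool.false_eq_true, if_neg, not_false_iff] at h
          have hnv : n ∉ vis := fun hc => h2 ((PySem.Set.contains_iff vis n).mpr hc)
          rw [PySem.Set.add_of_not_mem hnv] at h
          have := ih _ _ _ _ (fun m hm => hP m (List.mem_cons_of_mem _ hm)) h
          have hmem : n ∈ P.toFinset \ vis.toFinset := by
            simp only [Finset.mem_sdiff, List.mem_toFinset]
            exact ⟨hP n (List.mem_cons_self), hnv⟩
          have hins : (vis ++ [n]).toFinset = insert n vis.toFinset := by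
            simp [List.toFinset_append, Finset.union_singleton]
          rw [hins] at this
          have herase : P.toFinset \ insert n vis.toFinset = (P.toFinset \ vis.toFinset).erase n := by
            rw [Finset.sdiff_insert]
          rw [herase, Finset.card_erase_of_mem hmem] at this
          have hpos : 1 ≤ (P.toFinset \ vis.toFinset).card := Finset.card_pos.mpr ⟨n, hmem⟩
          simp only [List.length_append, List.length_singleton] at this
          omega

-- A's while loop over the (node, distance) queue
def pvLoopA (graph : List (String × List String)) (end_ : String) (md : Int)
    (queue : List (String × Int)) (visited : PySem.Set String) : Bool :=
  match queue with
  | [] => false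
  | (node, d) :: rest =>
    if d > md then false
    else
      match h : pvScanA end_ d (PySem.Dict.getD (PySem.Dict.mk graph) node []) rest visited with
      | none => true
      | some (q', vis') => pvLoopA graph end_ md q' vis'
termination_by queue.length + (((graph.map Prod.snd).flatten).toFinset \ visited.toFinset).card
decreasing_by
  have := pvScanA_measure ((graph.map Prod.snd).flatten) end_ d
    (PySem.Dict.getD (PySem.Dict.mk graph) node []) rest visited q' vis'
    (pvGetD_subset graph node) h
  simp only [List.length_cons]
  omega

def shortest_path_by_bfs (graph : List (String × List String)) (start : String) (end_ : String) (max_distance : Int) : Bool :=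
  if start == end_ then true
  else pvLoopA graph end_ max_distance [(start, 0)] (PySem.Set.ofList [start])

-- ===== PORT B =====
-- 'expanded = reach | {nb for node in reach for nb in graph.get(node, [])}'
-- (the set comprehension = Set.ofList of the flattened neighbor lists, '|' = Set.union)
def pvExpandB (graph : List (String × List String)) (reach : PySem.Set String) : PySem.Set String :=
  PySem.Set.union reach
    (PySem.Set.ofList (reach.flatMap (fun node => PySem.Dict.getD (PySem.Dict.mk graph) node [])))

-- 'for _ in range(max_distance + 1)' loop of B, with the fixed-point break
def pvSaturateB (graph : List (String × List String)) : Nat → PySem.Set String → PySem.Set String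
  | 0, reach => reach
  | k + 1, reach =>
    let expanded := pvExpandB graph reach
    if expanded.length = reach.length then reach
    else pvSaturateB graph k expanded

def shortest_path_by_bfs_alt (graph : List (String × List String)) (start : String) (end_ : String) (max_distance : Int) : Bool :=
  if start == end_ then true
  else PySem.Set.contains (pvSaturateB graph (max_distance + 1).toNat (PySem.Set.ofList [start])) end_

-- ===== PRECONDITION & SPEC =====
def Spec_shortest_path_by_bfs (graph : List (String × List String)) (start : String) (end_ : String) (max_distance : Int) (out : Bool) : Prop := out = shortest_path_by_bfs_alt graph start end_ max_distance
instance (graph : List (String × List String)) (start : String) (end_ : String) (max_distance : Int) (out : Bool) : Decidable (Spec_shortest_path_by_bfs graph start end_ max_distance out) := by unfold Spec_shortest_path_by_bfs; infer_instance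

-- ===== CLAIM (what is proved, stated in full; the proofs are below) =====
def Claim_equal_shortest_path_by_bfs : Prop := ∀ (graph : List (String × List String)) (start : String) (end_ : String) (max_distance : Int), Dom_shortest_path_by_bfs graph start end_ max_distance → Spec_shortest_path_by_bfs graph start end_ max_distance (shortest_path_by_bfs graph start end_ max_distance)

-- ===== LEMMAS AND PROOFS =====

-- Semantic layer: neighbor image and k-step reachable set, as Finsets
def pvN (graph : List (String × List String)) (S : Finset String) : Finset String :=
  S.biUnion (fun v => (PySem.Dict.getD (PySem.Dict.mk graph) v []).toFinset)

def pvReach (graph : List (String × List String)) : Nat → Finset String → Finset String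
  | 0, S => S
  | k + 1, S => pvReach graph k (S ∪ pvN graph S)

theorem pvN_mono (graph : List (String × List String)) {S T : Finset String} (h : S ⊆ T) :
    pvN graph S ⊆ pvN graph T := Finset.biUnion_subset_biUnion_of_subset_left _ h

theorem pvReach_self (graph : List (String × List String)) :
    ∀ (k : Nat) (S : Finset String), S ⊆ pvReach graph k S := by
  intro k
  induction k with
  | zero => intro S; exact subset_rfl
  | succ k ih =>
      intro S
      exact Finset.Subset.trans Finset.subset_union_left (ih (S ∪ pvN graph S))

theorem pvReach_fixed (graph : List (String × List String)) :
    ∀ (k : Nat) (S : Finset String), pvN graph S ⊆ S → pvReach graph k S = S := by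
  intro k
  induction k with
  | zero => intro S _; rfl
  | succ k ih =>
      intro S h
      have hu : S ∪ pvN graph S = S := Finset.union_eq_left.mpr h
      have : pvReach graph (k + 1) S = pvReach graph k (S ∪ pvN graph S) := rfl
      rw [this, hu]; exact ih S h

-- ————— B side —————
theorem pvExpandB_toFinset (graph : List (String × List String)) (reach : PySem.Set String) :
    (pvExpandB graph reach).toFinset = reach.toFinset ∪ pvN graph reach.toFinset := by
  ext x
  simp only [pvExpandB, List.mem_toFinset, Finset.mem_union, pvN, Finset.mem_biUnion,
    PySem.Set.mem_union, PySem.Set.mem_ofList, List.mem_flatMap]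

theorem pvExpandB_nodup (graph : List (String × List String)) (reach : PySem.Set String)
    (h : reach.Nodup) : (pvExpandB graph reach).Nodup :=
  PySem.Set.nodup_union _ _ h

theorem pvSaturateB_toFinset (graph : List (String × List String)) :
    ∀ (k : Nat) (reach : PySem.Set String), reach.Nodup →
      (pvSaturateB graph k reach).toFinset = pvReach graph k reach.toFinset := by
  intro k
  induction k with
  | zero => intro reach _; rfl
  | succ k ih =>
      intro reach hnd
      show (if (pvExpandB graph reach).length = reach.length then reach
            else pvSaturateB graph k (pvExpandB graph reach)).toFinset = _
      by_cases hlen : (pvExpandB graph reach).length = reach.length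
      · rw [if_pos hlen]
        have hsub : reach.toFinset ⊆ (pvExpandB graph reach).toFinset := by
          rw [pvExpandB_toFinset]; exact Finset.subset_union_left
        have hcard : (pvExpandB graph reach).toFinset.card ≤ reach.toFinset.card := by
          rw [List.toFinset_card_of_nodup (pvExpandB_nodup graph reach hnd),
            List.toFinset_card_of_nodup hnd, hlen]
        have heq : reach.toFinset = (pvExpandB graph reach).toFinset :=
          Finset.eq_of_subset_of_card_le hsub hcard
        have hNsub : pvN graph reach.toFinset ⊆ reach.toFinset := by
          intro x hx
          rw [heq, pvExpandB_toFinset]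
          exact Finset.mem_union_right _ hx
        exact (pvReach_fixed graph (k + 1) reach.toFinset hNsub).symm
      · rw [if_neg hlen]
        rw [ih (pvExpandB graph reach) (pvExpandB_nodup graph reach hnd)]
        rw [pvExpandB_toFinset]
        rfl

-- ————— A side, stage 1: A's queue loop = a level-synchronous loop (proof helpers) —————
-- the level-synchronous inner scans and loop (proof-only; compare with pvScanA/pvLoopA)
def pvScanNbrsL (end_ : String) : List String → List String → PySem.Set String → Option (List String × PySem.Set String)
  | [], nextFrontier, visited => some (nextFrontier, visited)
  | n :: ns, nextFrontier, visited =>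
    if n == end_ then none
    else if PySem.Set.contains visited n then pvScanNbrsL end_ ns nextFrontier visited
    else pvScanNbrsL end_ ns (nextFrontier ++ [n]) (PySem.Set.add visited n)

def pvScanFrontL (graph : List (String × List String)) (end_ : String) : List String → List String → PySem.Set String → Option (List String × PySem.Set String)
  | [], nextFrontier, visited => some (nextFrontier, visited)
  | node :: rest, nextFrontier, visited =>
    match pvScanNbrsL end_ (PySem.Dict.getD (PySem.Dict.mk graph) node []) nextFrontier visited with
    | none => none
    | some (nf', vis') => pvScanFrontL graph end_ rest nf' vis'

def pvLevelsL (graph : List (String × List String)) (end_ : String) : Nat → List String → PySem.Set String → Bool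
  | 0, _, _ => false
  | k + 1, frontier, visited =>
    if frontier.isEmpty then false
    else
      match pvScanFrontL graph end_ frontier [] visited with
      | none => true
      | some (next, vis') => pvLevelsL graph end_ k next vis'

-- A's inner scan on a queue 'prefix ++ level-(d+1) tail' is the level scan on the tail
theorem pvScan_corr (end_ : String) (d : Int) :
    ∀ (ns q2 acc : List String) (vis : PySem.Set String),
      pvScanA end_ d ns (q2.map (fun n => (n, d)) ++ acc.map (fun n => (n, d + 1))) vis =
        (pvScanNbrsL end_ ns acc vis).map
          (fun p => (q2.map (fun n => (n, d)) ++ p.1.map (fun n => (n, d + 1)), p.2)) := by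
  intro ns
  induction ns with
  | nil => intro q2 acc vis; simp [pvScanA, pvScanNbrsL]
  | cons n ns ih =>
      intro q2 acc vis
      simp only [pvScanA, pvScanNbrsL]
      by_cases h1 : (n == end_) = true
      · simp [h1]
      · simp only [h1, Bool.false_eq_true, if_false]
        by_cases h2 : PySem.Set.contains vis n = true
        · simp only [h2, if_pos]
          exact ih q2 acc vis
        · simp only [h2, Bool.false_eq_true, if_neg, not_false_iff]
          have := ih q2 (acc ++ [n]) (PySem.Set.add vis n)
          simpa [List.map_append, List.append_assoc] using this

-- one level of A's queue BFS is one round of the level scan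
theorem pvLevel_corr (graph : List (String × List String)) (end_ : String) (md : Int) (d : Int)
    (hd : ¬ d > md) :
    ∀ (l1 l2 : List String) (vis : PySem.Set String),
      pvLoopA graph end_ md (l1.map (fun n => (n, d)) ++ l2.map (fun n => (n, d + 1))) vis =
        match pvScanFrontL graph end_ l1 l2 vis with
        | none => true
        | some (l2', vis') => pvLoopA graph end_ md (l2'.map (fun n => (n, d + 1))) vis' := by
  intro l1
  induction l1 with
  | nil => intro l2 vis; simp [pvScanFrontL]
  | cons node rest ih =>
      intro l2 vis
      simp only [List.map_cons, List.cons_append]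
      rw [pvLoopA]
      simp only [hd, if_false]
      rw [pvScan_corr end_ d _ rest l2 vis]
      simp only [pvScanFrontL]
      cases hB : pvScanNbrsL end_ (PySem.Dict.getD (PySem.Dict.mk graph) node []) l2 vis with
      | none => simp
      | some p =>
          obtain ⟨l2'', vis''⟩ := p
          simp only [Option.map_some]
          exact ih l2'' vis''

theorem pvLoopA_high (graph : List (String × List String)) (end_ : String) (md : Int)
    (l : List (String × Int)) (vis : PySem.Set String) (h : ∀ p ∈ l, md < p.2) :
    pvLoopA graph end_ md l vis = false := by
  cases l with
  | nil => rw [pvLoopA]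
  | cons p rest =>
      obtain ⟨node, dd⟩ := p
      rw [pvLoopA]
      have hgt : dd > md := h (node, dd) List.mem_cons_self
      simp [hgt]

theorem pvLoop_levels (graph : List (String × List String)) (end_ : String) (md : Int) :
    ∀ (k : Nat) (d : Int) (l : List String) (vis : PySem.Set String),
      0 ≤ d → d ≤ md → k = (md - d).toNat + 1 →
      pvLoopA graph end_ md (l.map (fun n => (n, d))) vis = pvLevelsL graph end_ k l vis := by
  intro k
  induction k with
  | zero => intro d l vis h0 hdm hk; omega
  | succ k ih =>
      intro d l vis h0 hdm hk
      cases l with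
      | nil => simp only [List.map_nil]; rw [pvLoopA]; simp [pvLevelsL]
      | cons x xs =>
          simp only [pvLevelsL, List.isEmpty_cons, Bool.false_eq_true, if_false]
          have hcorr := pvLevel_corr graph end_ md d (by omega) (x :: xs) [] vis
          simp only [List.map_nil, List.append_nil] at hcorr
          rw [hcorr]
          cases hB : pvScanFrontL graph end_ (x :: xs) [] vis with
          | none => rfl
          | some p =>
              obtain ⟨next, vis'⟩ := p
              by_cases hlt : d < md
              · exact ih (d + 1) next vis' (by omega) (by omega) (by omega)
              · have hk0 : k = 0 := by omega
                subst hk0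
                simp only [pvLevelsL]
                apply pvLoopA_high
                intro q hq
                simp only [List.mem_map] at hq
                obtain ⟨n, _, rfl⟩ := hq
                omega

-- ————— A side, stage 2: the level loop computes membership in pvReach —————
theorem pvScanNbrsL_none (end_ : String) :
    ∀ (ns acc : List String) (vis : PySem.Set String),
      pvScanNbrsL end_ ns acc vis = none ↔ end_ ∈ ns := by
  intro ns
  induction ns with
  | nil => intro acc vis; simp [pvScanNbrsL]
  | cons n ns ih =>
      intro acc vis
      simp only [pvScanNbrsL, List.mem_cons]
      by_cases h1 : (n == end_) = true
      · simp [eq_of_beq h1]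
      · have hne : ¬ end_ = n := fun h => h1 (by simp [h])
        simp only [h1, Bool.false_eq_true, if_false]
        by_cases h2 : n ∈ vis
        · simp [h2, ih, hne]
        · simp [h2, ih, hne]

theorem pvScanNbrsL_some (end_ : String) :
    ∀ (ns acc : List String) (vis : PySem.Set String), end_ ∉ ns →
      ∃ nf vis', pvScanNbrsL end_ ns acc vis = some (nf, vis') ∧
        nf.toFinset = acc.toFinset ∪ (ns.toFinset \ vis.toFinset) ∧
        vis'.toFinset = vis.toFinset ∪ ns.toFinset := by
  intro ns
  induction ns with
  | nil => intro acc vis _; exact ⟨acc, vis, rfl, by simp, by simp⟩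
  | cons n ns ih =>
      intro acc vis hend
      have hne : ¬ (n == end_) = true := fun h => hend (by simp [eq_of_beq h])
      have hend' : end_ ∉ ns := fun h => hend (List.mem_cons_of_mem _ h)
      simp only [pvScanNbrsL, hne, Bool.false_eq_true, if_false]
      by_cases h2 : n ∈ vis
      · have hnv : n ∈ vis := h2
        obtain ⟨nf, vis', heq, hnf, hvis⟩ := ih acc vis hend'
        refine ⟨nf, vis', by simp [h2, heq], ?_, ?_⟩
        · rw [hnf]; ext x
          simp only [Finset.mem_union, Finset.mem_sdiff, List.mem_toFinset, List.mem_cons]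
          constructor
          · rintro (h | ⟨h, hv⟩); · exact Or.inl h
            · exact Or.inr ⟨Or.inr h, hv⟩
          · rintro (h | ⟨(rfl | h), hv⟩); · exact Or.inl h
            · exact absurd hnv hv
            · exact Or.inr ⟨h, hv⟩
        · rw [hvis]; ext x
          simp only [Finset.mem_union, List.mem_toFinset, List.mem_cons]
          constructor
          · rintro (h | h); · exact Or.inl h
            · exact Or.inr (Or.inr h)
          · rintro (h | (rfl | h)); · exact Or.inl h
            · exact Or.inl hnv
            · exact Or.inr h
      · have hnv : n ∉ vis := h2
        rw [PySem.Set.add_of_not_mem hnv]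
        obtain ⟨nf, vis', heq, hnf, hvis⟩ := ih (acc ++ [n]) (vis ++ [n]) hend'
        refine ⟨nf, vis', by simp [h2, heq], ?_, ?_⟩
        · rw [hnf]; ext x
          simp only [Finset.mem_union, Finset.mem_sdiff, List.mem_toFinset, List.mem_cons,
            List.mem_append]
          by_cases hx : x = n
          · subst hx; simp [hnv]
          · simp only [hx, false_or]
            tauto
        · rw [hvis]; ext x
          simp only [Finset.mem_union, List.mem_toFinset, List.mem_cons, List.mem_append]
          tauto

theorem pvScanFrontL_sem (graph : List (String × List String)) (end_ : String) :
    ∀ (l acc : List String) (vis : PySem.Set String),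
      (pvScanFrontL graph end_ l acc vis = none ↔ end_ ∈ pvN graph l.toFinset) ∧
      (end_ ∉ pvN graph l.toFinset →
        ∃ nf vis', pvScanFrontL graph end_ l acc vis = some (nf, vis') ∧
          nf.toFinset = acc.toFinset ∪ (pvN graph l.toFinset \ vis.toFinset) ∧
          vis'.toFinset = vis.toFinset ∪ pvN graph l.toFinset) := by
  intro l
  induction l with
  | nil =>
      intro acc vis
      constructor
      · simp [pvScanFrontL, pvN]
      · intro _; exact ⟨acc, vis, rfl, by simp [pvN], by simp [pvN]⟩
  | cons node rest ih =>
      intro acc vis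
      have hNcons : pvN graph (node :: rest).toFinset =
          (PySem.Dict.getD (PySem.Dict.mk graph) node []).toFinset ∪ pvN graph rest.toFinset := by
        simp [pvN, List.toFinset_cons, Finset.biUnion_insert]
      by_cases hadj : end_ ∈ PySem.Dict.getD (PySem.Dict.mk graph) node []
      · have hnone : pvScanNbrsL end_ (PySem.Dict.getD (PySem.Dict.mk graph) node []) acc vis = none :=
          (pvScanNbrsL_none end_ _ acc vis).mpr hadj
        constructor
        · simp only [pvScanFrontL, hnone, hNcons]
          simp [hadj]
        · intro hmem
          exact absurd (by rw [hNcons]; exact Finset.mem_union_left _ (by simpa using hadj)) hmem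
      · obtain ⟨nf1, vis1, heq1, hnf1, hvis1⟩ :=
          pvScanNbrsL_some end_ (PySem.Dict.getD (PySem.Dict.mk graph) node []) acc vis hadj
        have hstep : pvScanFrontL graph end_ (node :: rest) acc vis =
            pvScanFrontL graph end_ rest nf1 vis1 := by
          simp [pvScanFrontL, heq1]
        obtain ⟨hnoneIH, hsomeIH⟩ := ih nf1 vis1
        constructor
        · rw [hstep, hnoneIH, hNcons]
          simp only [Finset.mem_union, List.mem_toFinset]
          tauto
        · intro hmem
          have hrest : end_ ∉ pvN graph rest.toFinset := fun h =>
            hmem (by rw [hNcons]; exact Finset.mem_union_right _ h)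
          obtain ⟨nf, vis', heq, hnf, hvis⟩ := hsomeIH hrest
          refine ⟨nf, vis', by rw [hstep]; exact heq, ?_, ?_⟩
          · rw [hnf, hnf1, hvis1, hNcons]
            ext x
            simp only [Finset.mem_union, Finset.mem_sdiff, List.mem_toFinset, Finset.mem_union]
            tauto
          · rw [hvis, hvis1, hNcons]
            ext x
            simp only [Finset.mem_union, List.mem_toFinset]
            tauto

theorem pvLevelsL_sem (graph : List (String × List String)) (end_ : String) :
    ∀ (k : Nat) (F : List String) (V : PySem.Set String),
      F.toFinset ⊆ V.toFinset →
      pvN graph (V.toFinset \ F.toFinset) ⊆ V.toFinset →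
      end_ ∉ V.toFinset →
      pvLevelsL graph end_ k F V = decide (end_ ∈ pvReach graph k V.toFinset) := by
  intro k
  induction k with
  | zero =>
      intro F V _ _ hend
      simp [pvLevelsL, pvReach, hend]
  | succ k ih =>
      intro F V hFV hNinv hend
      cases hF : F with
      | nil =>
          have hNV : pvN graph V.toFinset ⊆ V.toFinset := by
            have := hNinv
            rw [hF] at this
            simpa using this
          have hfix : pvReach graph (k + 1) V.toFinset = V.toFinset :=
            pvReach_fixed graph (k + 1) V.toFinset hNV
          simp [pvLevelsL, hfix, hend]
      | cons x xs =>
          subst hF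
          simp only [pvLevelsL, List.isEmpty_cons, Bool.false_eq_true, if_false]
          by_cases hmem : end_ ∈ pvN graph (x :: xs).toFinset
          · have hnone : pvScanFrontL graph end_ (x :: xs) [] V = none :=
              ((pvScanFrontL_sem graph end_ (x :: xs) [] V).1).mpr hmem
            rw [hnone]
            have hstep : end_ ∈ V.toFinset ∪ pvN graph V.toFinset :=
              Finset.mem_union_right _ (pvN_mono graph hFV hmem)
            have : end_ ∈ pvReach graph (k + 1) V.toFinset :=
              pvReach_self graph k (V.toFinset ∪ pvN graph V.toFinset) hstep
            simp [this]
          · obtain ⟨nf, vis', heq, hnf, hvis⟩ :=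
              (pvScanFrontL_sem graph end_ (x :: xs) [] V).2 hmem
            rw [heq]
            show pvLevelsL graph end_ k nf vis' =
              decide (end_ ∈ pvReach graph (k + 1) (List.toFinset V))
            have hVsplit : pvN graph V.toFinset ⊆ V.toFinset ∪ pvN graph (x :: xs).toFinset := by
              intro y hy
              have hVdecomp : V.toFinset = (V.toFinset \ (x :: xs).toFinset) ∪ (x :: xs).toFinset := by
                rw [Finset.sdiff_union_self_eq_union, Finset.union_eq_left.mpr hFV]
              rw [hVdecomp, pvN, Finset.union_biUnion] at hy
              rcases Finset.mem_union.mp hy with h | h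
              · exact Finset.mem_union_left _ (hNinv h)
              · exact Finset.mem_union_right _ h
            have hvisStep : vis'.toFinset = V.toFinset ∪ pvN graph V.toFinset := by
              rw [hvis]
              apply Finset.Subset.antisymm
              · exact Finset.union_subset Finset.subset_union_left
                  (fun y hy => Finset.mem_union_right _ (pvN_mono graph hFV hy))
              · exact Finset.union_subset Finset.subset_union_left hVsplit
            have hnfStep : nf.toFinset = pvN graph (x :: xs).toFinset \ V.toFinset := by
              rw [hnf]; simp
            have hinv1 : nf.toFinset ⊆ vis'.toFinset := by
              rw [hnfStep, hvis]
              intro y hy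
              rcases Finset.mem_sdiff.mp hy with ⟨h1, _⟩
              exact Finset.mem_union_right _ h1
            have hinv2 : pvN graph (vis'.toFinset \ nf.toFinset) ⊆ vis'.toFinset := by
              have hdiff : vis'.toFinset \ nf.toFinset = V.toFinset := by
                rw [hvis, hnfStep]
                ext y
                simp only [Finset.mem_sdiff, Finset.mem_union, not_and, not_not]
                constructor
                · rintro ⟨h1 | h1, h2⟩
                  · exact h1
                  · exact h2 h1
                · intro h; exact ⟨Or.inl h, fun _ => h⟩
              rw [hdiff, hvisStep]
              exact Finset.subset_union_right
            have hinv3 : end_ ∉ vis'.toFinset := by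
              rw [hvis]
              intro h
              rcases Finset.mem_union.mp h with h | h
              · exact hend h
              · exact hmem h
            rw [ih nf vis' hinv1 hinv2 hinv3, hvisStep]
            rfl

-- ————— top-level assembly —————
theorem pvA_eq_levels (graph : List (String × List String)) (start end_ : String) (md : Int)
    (hse : ¬ (start == end_) = true) :
    pvLoopA graph end_ md [(start, 0)] (PySem.Set.ofList [start]) =
      pvLevelsL graph end_ (md + 1).toNat [start] (PySem.Set.ofList [start]) := by
  by_cases hmd : md < 0
  · have h0 : (md + 1).toNat = 0 := by omega
    rw [h0]
    rw [pvLoopA]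
    simp only [pvLevelsL]
    have : (0 : Int) > md := by omega
    simp [this]
  · have hk : (md + 1).toNat = (md - 0).toNat + 1 := by omega
    have := pvLoop_levels graph end_ md ((md + 1).toNat) 0 [start] (PySem.Set.ofList [start])
      le_rfl (by omega) hk
    simpa using this

-- ===== VERDICT (by name: the statement is the Claim_ definition above) =====
theorem shortest_path_by_bfs_spec : Claim_equal_shortest_path_by_bfs := by
  intro graph start end_ md _
  unfold Spec_shortest_path_by_bfs shortest_path_by_bfs shortest_path_by_bfs_alt
  by_cases hse : (start == end_) = true
  · simp [hse]
  · simp only [hse, Bool.false_eq_true, if_neg, not_false_iff]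
    have h1 : (PySem.Set.ofList [start] : List String) = [start] :=
      PySem.Set.ofList_eq_self_of_nodup _ (List.nodup_singleton start)
    have hes : end_ ∉ ([start] : List String).toFinset := by
      simp only [List.toFinset_cons, List.toFinset_nil, insert_empty_eq, Finset.mem_singleton]
      intro h; exact hse (by simp [h])
    have hlev := pvLevelsL_sem graph end_ ((md + 1).toNat) [start] [start]
      subset_rfl (by simp [pvN]) hes
    have hsat := pvSaturateB_toFinset graph ((md + 1).toNat) [start] (List.nodup_singleton start)
    rw [pvA_eq_levels graph start end_ md hse, h1, hlev]
    rw [Bool.eq_iff_iff]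
    simp only [PySem.Set.contains_iff, decide_eq_true_eq, ← List.mem_toFinset, hsat]
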